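-- pv_equiv track=rewrite | github.com/HBinhCT/Q-project | hackerrank/Algorithms/Real Estate Broker/solution.py | realEstateBroker
-- ===== SOURCE A (Python) =====
-- def realEstateBroker(clients, houses):
--     #
--     # Write your code here.
--     #
--     size_clients = len(clients)
--     size_houses = len(houses)
--     data = [[] for _ in range(size_clients)]
--     for i in range(size_clients):
--         a, p = clients[i]
--         for x, y in houses:
--             data[i].append(int(a < x and p >= y))
--
--     def is_interested_in(u, matched, visited):
--         for v in range(size_houses):
--             if data[u][v] and not visited[v]:
--                 visited[v] = True
--                 if matched[v] == -1 or is_interested_in(matched[v], matched, visited):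
--                     matched[v] = u
--                     return True
--         return False
--
--     match = [-1] * size_houses
--     res = 0
--     for i in range(size_clients):
--         seen = [False] * size_houses
--         if is_interested_in(i, match, seen):
--             res += 1
--     return res
-- ===== SOURCE B (Python) =====
-- def realEstateBroker(clients, houses):
--     # Iterative augmenting-path matching: explicit frame stack with recorded path,
--     # edge test (a < x and p >= y) computed on the fly (no adjacency matrix),
--     # augmentation done by flipping the recorded path after the search.
--     H = len(houses)
--     matched = [-1] * H
--     res = 0
--     for i in range(len(clients)):
--         visited = [False] * H
--         # frame = [client, next house index to try, house chosen to descend through]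
--         stack = [[i, 0, -1]]
--         found = False
--         while stack and not found:
--             u, j, _ = stack[-1]
--             if j >= H:
--                 stack.pop()
--                 continue
--             stack[-1][1] = j + 1
--             a, p = clients[u]
--             x, y = houses[j]
--             if a < x and p >= y and not visited[j]:
--                 visited[j] = True
--                 stack[-1][2] = j
--                 if matched[j] == -1:
--                     for u2, _, c2 in reversed(stack):
--                         matched[c2] = u2
--                     found = True
--                 else:
--                     stack.append([matched[j], 0, -1])
--         if found:
--             res += 1
--     return res
-- ===== Notes on version B (the rewrite author's own statement) =====
-- stated objective: alternative
-- what changed: The recursive Kuhn DFS that mutates the matching while unwinding and reads a precomputed O(n*m) adjacency matrix is replaced by an iterative augmenting-path search over an explicit frame stack that records the chosen house per frame, tests affordability (a < x and p >= y) on the fly, and flips the recorded path in one pass after a free house is found.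
import Mathlib
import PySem

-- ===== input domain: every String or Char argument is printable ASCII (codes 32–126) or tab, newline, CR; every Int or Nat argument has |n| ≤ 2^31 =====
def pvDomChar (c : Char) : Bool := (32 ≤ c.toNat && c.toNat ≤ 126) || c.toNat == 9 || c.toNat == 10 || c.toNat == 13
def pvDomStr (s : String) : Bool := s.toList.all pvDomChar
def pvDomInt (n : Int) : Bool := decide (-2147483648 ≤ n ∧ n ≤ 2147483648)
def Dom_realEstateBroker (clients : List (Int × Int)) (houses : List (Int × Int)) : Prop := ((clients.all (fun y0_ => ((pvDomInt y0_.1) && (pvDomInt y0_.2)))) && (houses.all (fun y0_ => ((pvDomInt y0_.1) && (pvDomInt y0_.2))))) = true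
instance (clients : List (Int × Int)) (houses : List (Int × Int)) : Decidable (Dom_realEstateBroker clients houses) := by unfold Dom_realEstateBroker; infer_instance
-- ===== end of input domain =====

-- B replaces A's recursive, mutate-on-unwind Kuhn DFS over a precomputed adjacency
-- matrix by an iterative explicit-stack search that records the chosen house per frame,
-- tests affordability on the fly, and flips the recorded path afterwards (objective: alternative).

-- ===== PORT A =====
-- number of `false` entries of the visited array (termination measures only)
def pvCountFalse (l : List Bool) : Nat := l.count false

-- A's recursive `is_interested_in(u, matched, visited)`, scanning houses from index v.
-- Returns (result, matched, visited).  The `fuel` parameter is only a totality guard for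
-- the recursion through `matched[v]` (each such descent consumes a freshly visited house,
-- so fuel `H+1`, as passed by `realEstateBroker`, is never exhausted).
def dfsA (data : List (List Int)) (H : Nat) (fuel : Nat) (u : Nat) (matched : List Int)
    (visited : List Bool) (v : Nat) : Bool × List Int × List Bool :=
  match fuel with
  | 0 => (false, matched, visited)
  | f + 1 =>
    if v < H then
      if ((data.getD u []).getD v 0 ≠ 0 ∧ visited.getD v true = false) then
        let visited' := visited.set v true
        let m := matched.getD v (-1)
        if m = -1 then (true, matched.set v (u : Int), visited')
        else
          let r := dfsA data H f m.toNat matched visited' 0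
          if r.1 then (true, r.2.1.set v (u : Int), r.2.2)
          else dfsA data H (f + 1) u r.2.1 r.2.2 (v + 1)
      else dfsA data H (f + 1) u matched visited (v + 1)
    else (false, matched, visited)
  termination_by (fuel, H - v)

def realEstateBroker (clients : List (Int × Int)) (houses : List (Int × Int)) : Int :=
  let sizeClients := clients.length
  let sizeHouses := houses.length
  let data := clients.map (fun c => houses.map (fun h => if c.1 < h.1 ∧ c.2 ≥ h.2 then (1 : Int) else 0))
  let st := (List.range sizeClients).foldl
    (fun (st : Int × List Int) i =>
      let seen := List.replicate sizeHouses false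
      let r := dfsA data sizeHouses (sizeHouses + 1) i st.2 seen 0
      (if r.1 then st.1 + 1 else st.1, r.2.1))
    ((0 : Int), List.replicate sizeHouses (-1 : Int))
  st.1

-- ===== PORT B =====
-- flip the recorded path: for every frame (u, _, c) set matched[c] := u, top frame first
def assignPath (stack : List (Nat × Nat × Int)) (matched : List Int) : List Int :=
  stack.foldl (fun acc fr => acc.set fr.2.2.toNat (fr.1 : Int)) matched

-- termination helper for machineB (cited in its decreasing_by)
theorem pvCountFalse_set_true_lt (l : List Bool) (j : Nat) (h : l.getD j true = false) :
    pvCountFalse (l.set j true) < pvCountFalse l := by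
  induction l generalizing j with
  | nil => simp [List.getD] at h
  | cons b t ih =>
    cases j with
    | zero =>
      simp [List.getD] at h
      subst h
      simp [pvCountFalse, List.count_cons]
    | succ n =>
      have := ih n (by simpa [List.getD] using h)
      simp only [List.set]
      simp [pvCountFalse, List.count_cons] at this ⊢
      omega

-- Source B's `while stack and not found` loop; head of the list = top of the stack.
def machineB (clients houses : List (Int × Int)) (H : Nat) (stack : List (Nat × Nat × Int))
    (matched : List Int) (visited : List Bool) : Bool × List Int :=
  match stack with
  | [] => (false, matched)
  | (u, j, c) :: rest =>
    if H ≤ j then machineB clients houses H rest matched visited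
    else
      let a := (clients.getD u (0, 0)).1
      let p := (clients.getD u (0, 0)).2
      let x := (houses.getD j (0, 0)).1
      let y := (houses.getD j (0, 0)).2
      if (a < x ∧ p ≥ y ∧ visited.getD j true = false) then
        let visited' := visited.set j true
        let m := matched.getD j (-1)
        if m = -1 then (true, assignPath ((u, j + 1, (j : Int)) :: rest) matched)
        else machineB clients houses H ((m.toNat, 0, -1) :: (u, j + 1, (j : Int)) :: rest) matched visited'
      else machineB clients houses H ((u, j + 1, c) :: rest) matched visited
  termination_by (pvCountFalse visited, (stack.map (fun fr => H - fr.2.1)).sum + stack.length)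
  decreasing_by
  · exact Prod.Lex.right _ (by simp [Nat.sub_eq_zero_of_le ‹H ≤ j›])
  · exact Prod.Lex.left _ _ (pvCountFalse_set_true_lt _ _ (by tauto))
  · exact Prod.Lex.right _ (by
      have : j < H := lt_of_not_ge ‹¬ H ≤ j›
      simp only [List.map_cons, List.sum_cons, List.length_cons]
      omega)

def realEstateBroker_alt (clients : List (Int × Int)) (houses : List (Int × Int)) : Int :=
  let H := houses.length
  let st := (List.range clients.length).foldl
    (fun (st : Int × List Int) i =>
      let r := machineB clients houses H [(i, 0, -1)] st.2 (List.replicate H false)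
      (if r.1 then st.1 + 1 else st.1, r.2))
    ((0 : Int), List.replicate H (-1 : Int))
  st.1

-- ===== PRECONDITION & SPEC =====
def Spec_realEstateBroker (clients : List (Int × Int)) (houses : List (Int × Int)) (out : Int) : Prop := out = realEstateBroker_alt clients houses
instance (clients : List (Int × Int)) (houses : List (Int × Int)) (out : Int) : Decidable (Spec_realEstateBroker clients houses out) := by unfold Spec_realEstateBroker; infer_instance

-- ===== CLAIM (what is proved, stated in full; the proofs are below) =====
def Claim_equal_realEstateBroker : Prop := ∀ (clients : List (Int × Int)) (houses : List (Int × Int)), Dom_realEstateBroker clients houses → Spec_realEstateBroker clients houses (realEstateBroker clients houses)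

-- ===== LEMMAS AND PROOFS =====

theorem dfsA_fail_matched (data : List (List Int)) (H fuel u : Nat) (matched : List Int)
    (visited : List Bool) (v : Nat)
    (h : (dfsA data H fuel u matched visited v).1 = false) :
    (dfsA data H fuel u matched visited v).2.1 = matched := by
  fun_induction dfsA data H fuel u matched visited v with
  | case1 => rfl
  | case2 => simp at h
  | case3 => simp at h
  | case4 =>
    rename_i f hv hc hm hnr ih3 ih2 ih1
    exact (ih1 h).trans (ih3 (by simpa using hnr))
  | case5 =>
    rename_i f hv hc ih
    exact ih h
  | case6 => rfl

theorem pvCountFalse_set_true_le (l : List Bool) (j : Nat) :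
    pvCountFalse (l.set j true) ≤ pvCountFalse l := by
  induction l generalizing j with
  | nil => simp [pvCountFalse]
  | cons b t ih =>
    cases j with
    | zero => cases b <;> simp [pvCountFalse, List.count_cons]
    | succ n =>
      have := ih n
      simp only [List.set]
      simp [pvCountFalse, List.count_cons] at this ⊢
      omega

theorem dfsA_count_le (data : List (List Int)) (H fuel u : Nat) (matched : List Int)
    (visited : List Bool) (v : Nat) :
    pvCountFalse (dfsA data H fuel u matched visited v).2.2 ≤ pvCountFalse visited := by
  fun_induction dfsA data H fuel u matched visited v with
  | case1 => exact le_refl _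
  | case2 => exact pvCountFalse_set_true_le _ _
  | case3 =>
    rename_i f hv hc hm r hr ih1
    exact le_trans ih1 (pvCountFalse_set_true_le _ _)
  | case4 =>
    rename_i f hv hc hm r hnr ih3 ih2 ih1
    exact le_trans ih1 (le_trans ih3 (pvCountFalse_set_true_le _ _))
  | case5 =>
    rename_i f hv hc ih
    exact ih
  | case6 => exact le_refl _

-- every matched entry is -1 or a valid client index
def MatchedWF (n : Nat) (matched : List Int) : Prop :=
  ∀ m ∈ matched, m = -1 ∨ (0 ≤ m ∧ m.toNat < n)

theorem MatchedWF_set (n : Nat) (matched : List Int) (v u : Nat)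
    (hm : MatchedWF n matched) (hu : u < n) : MatchedWF n (matched.set v (u : Int)) := by
  intro m hmem
  rcases List.mem_or_eq_of_mem_set hmem with h | h
  · exact hm m h
  · subst h
    exact Or.inr ⟨Int.natCast_nonneg _, by simpa using hu⟩

theorem MatchedWF_getD (n : Nat) (matched : List Int) (v : Nat)
    (hm : MatchedWF n matched) (hne : matched.getD v (-1) ≠ -1) :
    (matched.getD v (-1)).toNat < n := by
  by_cases hv : v < matched.length
  · have hmem : matched.getD v (-1) ∈ matched := by
      rw [List.getD_eq_getElem?_getD, List.getElem?_eq_getElem hv, Option.getD_some]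
      exact matched.getElem_mem hv
    rcases hm _ hmem with h | h
    · exact absurd h hne
    · exact h.2
  · exfalso
    apply hne
    rw [List.getD_eq_getElem?_getD, List.getElem?_eq_none (le_of_not_gt hv)]
    rfl

theorem dfsA_wf (data : List (List Int)) (H fuel : Nat) (n u : Nat) (matched : List Int)
    (visited : List Bool) (v : Nat) :
    u < n → MatchedWF n matched → MatchedWF n (dfsA data H fuel u matched visited v).2.1 := by
  fun_induction dfsA data H fuel u matched visited v with
  | case1 => exact fun _ hm => hm
  | case2 =>
    rename_i f hv hc hm0
    exact fun hu hm => MatchedWF_set n _ _ _ hm hu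
  | case3 =>
    rename_i f hv hc hm0 r hr ih1
    intro hu hm
    exact MatchedWF_set n _ _ _ (ih1 (MatchedWF_getD n _ _ hm hm0) hm) hu
  | case4 =>
    rename_i f hv hc hm0 r hnr ih3 ih2 ih1
    intro hu hm
    exact ih1 hu (ih3 (MatchedWF_getD n _ _ hm hm0) hm)
  | case5 =>
    rename_i f hv hc ih
    exact ih
  | case6 => exact fun _ hm => hm

-- the edge test of B agrees with A's adjacency matrix entry
theorem edge_iff (clients houses : List (Int × Int)) (u v : Nat)
    (hu : u < clients.length) (hv : v < houses.length) :
    (((clients.map (fun cl => houses.map (fun h => if cl.1 < h.1 ∧ cl.2 ≥ h.2 then (1 : Int) else 0))).getD u []).getD v 0 ≠ 0)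
      ↔ ((clients.getD u (0, 0)).1 < (houses.getD v (0, 0)).1 ∧ (clients.getD u (0, 0)).2 ≥ (houses.getD v (0, 0)).2) := by
  simp only [List.getD_eq_getElem?_getD, List.getElem?_map, List.getElem?_eq_getElem hu,
    List.getElem?_eq_getElem hv, Option.map_some, Option.getD_some]
  split_ifs with h
  · simpa using h
  · simpa using h

theorem assignPath_cons (u j : Nat) (c : Int) (rest : List (Nat × Nat × Int)) (m : List Int) :
    assignPath ((u, j, c) :: rest) m = assignPath rest (m.set c.toNat (u : Int)) := rfl

-- the simulation lemma: one machineB frame behaves exactly like one dfsA call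
theorem simB (clients houses : List (Int × Int)) :
    ∀ (fuel k v u : Nat) (c : Int) (matched : List Int) (visited : List Bool)
      (rest : List (Nat × Nat × Int)),
      houses.length - v ≤ k →
      pvCountFalse visited < fuel →
      u < clients.length →
      MatchedWF clients.length matched →
      machineB clients houses houses.length ((u, v, c) :: rest) matched visited =
        (if (dfsA (clients.map (fun cl => houses.map (fun h => if cl.1 < h.1 ∧ cl.2 ≥ h.2 then (1 : Int) else 0))) houses.length fuel u matched visited v).1
         then (true, assignPath rest (dfsA (clients.map (fun cl => houses.map (fun h => if cl.1 < h.1 ∧ cl.2 ≥ h.2 then (1 : Int) else 0))) houses.length fuel u matched visited v).2.1)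
         else machineB clients houses houses.length rest matched
           (dfsA (clients.map (fun cl => houses.map (fun h => if cl.1 < h.1 ∧ cl.2 ≥ h.2 then (1 : Int) else 0))) houses.length fuel u matched visited v).2.2) := by
  intro fuel
  induction fuel using Nat.strong_induction_on with
  | _ fuel IHf =>
  intro k
  induction k with
  | zero =>
    intro v u c matched visited rest hk hf hu hm
    obtain ⟨f, rfl⟩ : ∃ f, fuel = f + 1 := ⟨fuel - 1, by omega⟩
    rw [machineB, dfsA]
    rw [if_pos (by omega : houses.length ≤ v), if_neg (by omega : ¬ v < houses.length)]
    simp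
  | succ k IHk =>
    intro v u c matched visited rest hk hf hu hm
    obtain ⟨f, rfl⟩ : ∃ f, fuel = f + 1 := ⟨fuel - 1, by omega⟩
    by_cases hvH : v < houses.length
    · rw [machineB, dfsA]
      rw [if_neg (not_le.mpr hvH), if_pos hvH]
      by_cases hvis : visited.getD v true = false
      · by_cases hedge : (clients.getD u (0, 0)).1 < (houses.getD v (0, 0)).1 ∧ (clients.getD u (0, 0)).2 ≥ (houses.getD v (0, 0)).2
        · -- candidate house: both sides take the edge branch
          have hdata : ((clients.map (fun cl => houses.map (fun h => if cl.1 < h.1 ∧ cl.2 ≥ h.2 then (1 : Int) else 0))).getD u []).getD v 0 ≠ 0 :=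
            (edge_iff clients houses u v hu hvH).mpr hedge
          have hcondB : (clients.getD u (0, 0)).1 < (houses.getD v (0, 0)).1 ∧ (clients.getD u (0, 0)).2 ≥ (houses.getD v (0, 0)).2 ∧ visited.getD v true = false :=
            ⟨hedge.1, hedge.2, hvis⟩
          have hcondA : ((clients.map (fun cl => houses.map (fun h => if cl.1 < h.1 ∧ cl.2 ≥ h.2 then (1 : Int) else 0))).getD u []).getD v 0 ≠ 0 ∧ visited.getD v true = false :=
            ⟨hdata, hvis⟩
          rw [if_pos hcondB]
          rw [if_pos hcondA]
          by_cases hm0 : matched.getD v (-1) = -1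
          · -- free house: augment
            rw [if_pos hm0]
            rw [if_pos hm0]
            simp [assignPath_cons]
          · -- occupied house: push / recurse
            rw [if_neg hm0]
            rw [if_neg hm0]
            have hcnt : pvCountFalse (visited.set v true) < pvCountFalse visited :=
              pvCountFalse_set_true_lt _ _ hvis
            have hmu : (matched.getD v (-1)).toNat < clients.length := MatchedWF_getD _ _ _ hm hm0
            have hinner := IHf f (by omega) houses.length 0 (matched.getD v (-1)).toNat (-1) matched
              (visited.set v true) ((u, v + 1, (v : Int)) :: rest) (by omega) (by omega) hmu hm
            rw [hinner]
            by_cases hr1 : (dfsA (clients.map (fun cl => houses.map (fun h => if cl.1 < h.1 ∧ cl.2 ≥ h.2 then (1 : Int) else 0))) houses.length f (matched.getD v (-1)).toNat matched (visited.set v true) 0).1 = true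
            · rw [if_pos hr1]
              rw [if_pos hr1]
              simp [assignPath_cons]
            · have hr1' := eq_false_of_ne_true hr1
              rw [if_neg hr1]
              rw [if_neg hr1]
              have hmatched := dfsA_fail_matched (clients.map (fun cl => houses.map (fun h => if cl.1 < h.1 ∧ cl.2 ≥ h.2 then (1 : Int) else 0))) houses.length f (matched.getD v (-1)).toNat matched (visited.set v true) 0 hr1'
              have hcnt2 := dfsA_count_le (clients.map (fun cl => houses.map (fun h => if cl.1 < h.1 ∧ cl.2 ≥ h.2 then (1 : Int) else 0))) houses.length f (matched.getD v (-1)).toNat matched (visited.set v true) 0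
              have hstep := IHk (v + 1) u (v : Int) matched (dfsA (clients.map (fun cl => houses.map (fun h => if cl.1 < h.1 ∧ cl.2 ≥ h.2 then (1 : Int) else 0))) houses.length f (matched.getD v (-1)).toNat matched (visited.set v true) 0).2.2 rest (by omega) (by omega) hu hm
              rw [hmatched]
              exact hstep
        · -- edge absent: skip
          have hnB : ¬ ((clients.getD u (0, 0)).1 < (houses.getD v (0, 0)).1 ∧ (clients.getD u (0, 0)).2 ≥ (houses.getD v (0, 0)).2 ∧ visited.getD v true = false) := by
            intro hc; exact hedge ⟨hc.1, hc.2.1⟩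
          have hnA : ¬ (((clients.map (fun cl => houses.map (fun h => if cl.1 < h.1 ∧ cl.2 ≥ h.2 then (1 : Int) else 0))).getD u []).getD v 0 ≠ 0 ∧ visited.getD v true = false) := by
            intro hc; exact hedge ((edge_iff clients houses u v hu hvH).mp hc.1)
          rw [if_neg hnB]
          rw [if_neg hnA]
          exact IHk (v + 1) u c matched visited rest (by omega) (by omega) hu hm
      · -- house already visited: skip
        have hnB : ¬ ((clients.getD u (0, 0)).1 < (houses.getD v (0, 0)).1 ∧ (clients.getD u (0, 0)).2 ≥ (houses.getD v (0, 0)).2 ∧ visited.getD v true = false) := by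
          intro hc; exact hvis hc.2.2
        have hnA : ¬ (((clients.map (fun cl => houses.map (fun h => if cl.1 < h.1 ∧ cl.2 ≥ h.2 then (1 : Int) else 0))).getD u []).getD v 0 ≠ 0 ∧ visited.getD v true = false) := by
          intro hc; exact hvis hc.2
        rw [if_neg hnB]
        rw [if_neg hnA]
        exact IHk (v + 1) u c matched visited rest (by omega) (by omega) hu hm
    · rw [machineB, dfsA]
      rw [if_pos (not_lt.mp hvH), if_neg hvH]
      simp

theorem foldAB (clients houses : List (Int × Int)) :
    ∀ (l : List Nat), (∀ i ∈ l, i < clients.length) → ∀ (res : Int) (matched : List Int),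
      MatchedWF clients.length matched →
      l.foldl (fun (st : Int × List Int) i =>
        let seen := List.replicate houses.length false
        let r := dfsA (clients.map (fun c => houses.map (fun h => if c.1 < h.1 ∧ c.2 ≥ h.2 then (1 : Int) else 0))) houses.length (houses.length + 1) i st.2 seen 0
        (if r.1 then st.1 + 1 else st.1, r.2.1)) (res, matched) =
      l.foldl (fun (st : Int × List Int) i =>
        let r := machineB clients houses houses.length [(i, 0, -1)] st.2 (List.replicate houses.length false)
        (if r.1 then st.1 + 1 else st.1, r.2)) (res, matched) := by
  intro l
  induction l with
  | nil => intro _ res matched _; rfl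
  | cons i t ih =>
    intro hmem res matched hwf
    have hi : i < clients.length := hmem i (List.mem_cons_self)
    have hcnt : pvCountFalse (List.replicate houses.length false) < houses.length + 1 := by
      simp [pvCountFalse]
    have hsim := simB clients houses (houses.length + 1) houses.length 0 i (-1) matched
      (List.replicate houses.length false) [] (by omega) hcnt hi hwf
    simp only [List.foldl_cons]
    rw [hsim]
    by_cases hA : (dfsA (clients.map (fun c => houses.map (fun h => if c.1 < h.1 ∧ c.2 ≥ h.2 then (1 : Int) else 0))) houses.length (houses.length + 1) i matched (List.replicate houses.length false) 0).1 = true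
    · rw [if_pos hA, if_pos hA]
      simp only [assignPath, List.foldl_nil, if_true]
      exact ih (fun j hj => hmem j (List.mem_cons_of_mem _ hj)) _ _
        (dfsA_wf _ _ _ _ _ _ _ _ hi hwf)
    · have hA' := eq_false_of_ne_true hA
      rw [if_neg hA, if_neg hA]
      have hmach : machineB clients houses houses.length [] matched
          (dfsA (clients.map (fun c => houses.map (fun h => if c.1 < h.1 ∧ c.2 ≥ h.2 then (1 : Int) else 0))) houses.length (houses.length + 1) i matched (List.replicate houses.length false) 0).2.2 = (false, matched) := by
        rw [machineB]
      rw [hmach]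
      rw [if_neg (by simp : ¬ ((false, matched) : Bool × List Int).1 = true)]
      rw [dfsA_fail_matched _ _ _ _ _ _ _ hA']
      exact ih (fun j hj => hmem j (List.mem_cons_of_mem _ hj)) _ _ hwf

-- ===== VERDICT (by name: the statement is the Claim_ definition above) =====
theorem realEstateBroker_spec : Claim_equal_realEstateBroker := by
  intro clients houses _
  unfold Spec_realEstateBroker realEstateBroker realEstateBroker_alt
  exact congrArg Prod.fst (foldAB clients houses (List.range clients.length)
    (fun i hi => List.mem_range.mp hi) 0 (List.replicate houses.length (-1))
    (fun m hm => Or.inl (List.eq_of_mem_replicate hm)))
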